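-- pv_equiv track=rewrite | github.com/josephcourtney/grobl | src/grobl/cli/root.py | _root_opt_skip
-- ===== SOURCE A (Python) =====
-- def _root_opt_skip(flag: str) -> int:
--     # Root options defined on the group.
--     if flag in {
--         "--config",
--         "--format",
--         "--output",
--         "--summary",
--         "--summary-style",
--         "--summary-to",
--         "--summary-output",
--         "--ignore-policy",
--     }:
--         return 2
--     if flag == "--copy":
--         return 1
--     # equals forms
--     for k in (
--         "--config=",
--         "--format=",
--         "--output=",
--         "--summary=",
--         "--summary-style=",
--         "--summary-to=",
--         "--summary-output=",
--         "--ignore-policy=",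
--     ):
--         if flag.startswith(k):
--             return 1
--     return 0
-- ===== SOURCE B (Python) =====
-- _BARE = {
--     "--config",
--     "--format",
--     "--output",
--     "--summary",
--     "--summary-style",
--     "--summary-to",
--     "--summary-output",
--     "--ignore-policy",
-- }
--
--
-- def _root_opt_skip(flag: str) -> int:
--     eq = flag.find("=")
--     if eq == -1:
--         if flag in _BARE:
--             return 2
--         return 1 if flag == "--copy" else 0
--     return 1 if flag[:eq] in _BARE else 0
-- ===== Notes on version B (the rewrite author's own statement) =====
-- stated objective: simpler
-- what changed: B locates the first equals sign once and does a single slice plus one set-membership test, so A's loop over the eight startswith prefixes disappears.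
import Mathlib
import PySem

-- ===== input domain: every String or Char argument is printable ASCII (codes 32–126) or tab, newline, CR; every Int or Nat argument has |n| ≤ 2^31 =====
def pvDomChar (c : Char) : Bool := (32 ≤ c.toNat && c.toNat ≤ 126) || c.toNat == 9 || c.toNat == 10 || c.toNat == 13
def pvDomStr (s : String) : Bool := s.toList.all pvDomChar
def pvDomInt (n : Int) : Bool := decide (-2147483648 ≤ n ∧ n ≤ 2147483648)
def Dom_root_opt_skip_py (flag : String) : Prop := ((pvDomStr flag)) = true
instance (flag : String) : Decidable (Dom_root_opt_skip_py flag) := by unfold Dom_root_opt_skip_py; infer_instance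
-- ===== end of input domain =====

-- B locates the first '=' once (find + one slice + one set-membership test) instead of scanning eight startswith prefixes; objective: simpler.

-- ===== PORT A =====
-- the group's root options (Python set literal in A)
def rootBareA : PySem.Set String := PySem.Set.ofList
  ["--config", "--format", "--output", "--summary", "--summary-style",
   "--summary-to", "--summary-output", "--ignore-policy"]

-- 'for k in (...): if flag.startswith(k): return 1' then 'return 0'
def rootLoopA (flag : String) : List String → Int
  | [] => 0
  | k :: rest => if PySem.Str.startswith flag k then 1 else rootLoopA flag rest

def root_opt_skip_py (flag : String) : Int :=
  if PySem.Set.contains rootBareA flag then 2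
  else if flag == "--copy" then 1
  else rootLoopA flag
    ["--config=", "--format=", "--output=", "--summary=", "--summary-style=",
     "--summary-to=", "--summary-output=", "--ignore-policy="]

-- ===== PORT B =====
-- module-level _BARE set in Source B
def rootBareB : PySem.Set String := PySem.Set.ofList
  ["--config", "--format", "--output", "--summary", "--summary-style",
   "--summary-to", "--summary-output", "--ignore-policy"]

def root_opt_skip_py_alt (flag : String) : Int :=
  let eq := PySem.Str.find flag "="
  if eq == -1 then
    if PySem.Set.contains rootBareB flag then 2
    else if flag == "--copy" then 1 else 0
  else
    if PySem.Set.contains rootBareB (PySem.Str.slice flag none (some eq)) then 1 else 0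

-- ===== PRECONDITION & SPEC =====
def Spec_root_opt_skip_py (flag : String) (out : Int) : Prop := out = root_opt_skip_py_alt flag
instance (flag : String) (out : Int) : Decidable (Spec_root_opt_skip_py flag out) := by unfold Spec_root_opt_skip_py; infer_instance

-- ===== CLAIM (what is proved, stated in full; the proofs are below) =====
def Claim_equal_root_opt_skip_py : Prop := ∀ (flag : String), Dom_root_opt_skip_py flag → Spec_root_opt_skip_py flag (root_opt_skip_py flag)

-- ===== LEMMAS AND PROOFS =====

theorem startswith_eq_take (cs n : List Char) (hn : '=' ∉ n)
    (e : Nat) (hpre : ['='] <+: cs.drop e) (hmin : ∀ i < e, ¬ ['='] <+: cs.drop i) :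
    ((n ++ ['=']) <+: cs ↔ cs.take e = n) := by
  constructor
  · rintro ⟨t, ht⟩
    have hcs : cs = n ++ '=' :: t := by rw [← ht]; simp
    subst hcs
    have h1 : ['='] <+: (n ++ '=' :: t).drop n.length := by simp
    have hle : e ≤ n.length := by
      by_contra h
      exact hmin n.length (by omega) h1
    have hge : n.length ≤ e := by
      by_contra h
      push Not at h
      obtain ⟨u, hu⟩ := hpre
      have hd : (n ++ '=' :: t).drop e = n.drop e ++ '=' :: t := by
        rw [List.drop_append_of_le_length (by omega)]
      rw [hd] at hu
      have hne : n.drop e ≠ [] := by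
        intro hh; have := List.drop_eq_nil_iff.mp hh; omega
      obtain ⟨a, as, ha⟩ := List.exists_cons_of_ne_nil hne
      rw [ha] at hu
      simp at hu
      have hma : a ∈ n := List.mem_of_mem_drop (by rw [ha]; exact List.mem_cons_self)
      exact hn (hu.1 ▸ hma)
    have he : e = n.length := le_antisymm hle hge
    subst he
    simp
  · intro htake
    obtain ⟨u, hu⟩ := hpre
    have hsplit : cs = cs.take e ++ cs.drop e := by simp
    rw [htake] at hsplit
    rw [hsplit, ← hu]
    simp

theorem sw_eq_take (cs n : List Char) (hn : '=' ∉ n) (h0 : 0 ≤ PySem.Chars.find cs ['=']) :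
    PySem.Chars.startswith cs (n ++ ['=']) =
      decide (cs.take (PySem.Chars.find cs ['=']).toNat = n) := by
  have spec := PySem.Chars.find_spec h0
  rw [Bool.eq_iff_iff]
  simp only [PySem.Chars.startswith_iff, decide_eq_true_iff]
  exact startswith_eq_take cs n hn _ spec.1 spec.2

theorem sw_false (cs k : List Char) (h : '=' ∉ cs) (hk : '=' ∈ k) :
    PySem.Chars.startswith cs k = false := by
  rw [Bool.eq_false_iff]
  intro htrue
  exact h (((PySem.Chars.startswith_iff _ _).mp htrue).subset hk)

theorem chain8 (T a1 a2 a3 a4 a5 a6 a7 a8 : List Char) :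
    (if T = a1 then (1:Int) else if T = a2 then 1 else if T = a3 then 1 else if T = a4 then 1
      else if T = a5 then 1 else if T = a6 then 1 else if T = a7 then 1 else if T = a8 then 1 else 0)
    = if (T = a1 ∨ T = a2 ∨ T = a3 ∨ T = a4 ∨ T = a5 ∨ T = a6 ∨ T = a7 ∨ T = a8) then 1 else 0 := by
  by_cases h1 : T = a1
  · simp [h1]
  · by_cases h2 : T = a2
    · simp [h2]
    · by_cases h3 : T = a3
      · simp [h3]
      · by_cases h4 : T = a4
        · simp [h4]
        · by_cases h5 : T = a5
          · simp [h5]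
          · by_cases h6 : T = a6
            · simp [h6]
            · by_cases h7 : T = a7
              · simp [h7]
              · by_cases h8 : T = a8
                · simp [h8]
                · simp [h1, h2, h3, h4, h5, h6, h7, h8]

theorem root_opt_skip_eq (flag : String) : root_opt_skip_py flag = root_opt_skip_py_alt flag := by
  unfold root_opt_skip_py root_opt_skip_py_alt
  have hBA : rootBareB = rootBareA := rfl
  rw [hBA]
  by_cases h : PySem.Str.find flag "=" = -1
  · -- no '=' in flag
    have hne : '=' ∉ flag.toList := by
      have h2 := (PySem.Str.find_eq_neg_one_iff (s := flag) (sub := "=")).mp h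
      intro hmem
      obtain ⟨sfx, t, hst⟩ := List.mem_iff_append.mp hmem
      exact h2 ⟨sfx, t, by simp [hst]⟩
    rw [h]
    simp [rootLoopA, sw_false _ _ hne]
  · -- '=' occurs in flag
    have hf : PySem.Str.find flag "=" = PySem.Chars.find flag.toList ['='] := by
      simp
    have h0 : 0 ≤ PySem.Chars.find flag.toList ['='] := by
      have hlb := PySem.Chars.neg_one_le_find (s := flag.toList) (sub := ['='])
      rw [hf] at h
      omega
    have spec := PySem.Chars.find_spec h0
    have hmem : '=' ∈ flag.toList :=
      List.mem_of_mem_drop (spec.1.subset (by simp))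
    have hs' : (PySem.Str.slice flag none (some (PySem.Str.find flag "="))).toList
        = flag.toList.take (PySem.Chars.find flag.toList ['=']).toNat := by
      rw [hf]
      simp [PySem.Str.toList_slice, PySem.List.slice_to _ h0]
    have c1 := sw_eq_take flag.toList "--config".toList (by decide) h0
    have c2 := sw_eq_take flag.toList "--format".toList (by decide) h0
    have c3 := sw_eq_take flag.toList "--output".toList (by decide) h0
    have c4 := sw_eq_take flag.toList "--summary".toList (by decide) h0
    have c5 := sw_eq_take flag.toList "--summary-style".toList (by decide) h0
    have c6 := sw_eq_take flag.toList "--summary-to".toList (by decide) h0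
    have c7 := sw_eq_take flag.toList "--summary-output".toList (by decide) h0
    have c8 := sw_eq_take flag.toList "--ignore-policy".toList (by decide) h0
    have hrb : rootBareA = ["--config", "--format", "--output", "--summary", "--summary-style",
        "--summary-to", "--summary-output", "--ignore-policy"] := by decide
    have hnb : flag ∉ rootBareA := by
      rw [hrb]
      simp
      refine ⟨?_,?_,?_,?_,?_,?_,?_,?_⟩ <;> (rintro rfl; revert hmem; decide)
    have hcopy : flag ≠ "--copy" := by rintro rfl; revert hmem; decide
    have hfind : ¬ PySem.Chars.find flag.toList "=".toList = -1 := by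
      rw [show ("=".toList) = ['='] from rfl, ← hf]; exact h
    simp only [rootLoopA]
    simp at c1 c2 c3 c4 c5 c6 c7 c8 hs'
    have hnb2 : ¬(flag = "--config" ∨ flag = "--format" ∨ flag = "--output" ∨ flag = "--summary" ∨
        flag = "--summary-style" ∨ flag = "--summary-to" ∨ flag = "--summary-output" ∨
        flag = "--ignore-policy") := by
      rw [hrb] at hnb
      simpa using hnb
    have h' : ¬ PySem.Chars.find flag.toList ['='] = -1 := by rw [← hf]; exact h
    have m : ∀ t : String, (PySem.Str.slice flag none (some (PySem.Chars.find flag.toList ['='])) = t) ↔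
        (List.take (PySem.Chars.find flag.toList ['=']).toNat flag.toList = t.toList) := by
      intro t
      rw [← String.toList_inj]
      simp [PySem.Str.toList_slice, PySem.List.slice_to _ h0]
    simp [hcopy, c1, c2, c3, c4, c5, c6, c7, c8, hrb, hnb2, h', m]
    generalize (List.take (PySem.Chars.find flag.toList ['=']).toNat flag.toList) = T
    exact chain8 T _ _ _ _ _ _ _ _

-- ===== VERDICT (by name: the statement is the Claim_ definition above) =====
theorem root_opt_skip_py_spec : Claim_equal_root_opt_skip_py := by
  intro flag _
  unfold Spec_root_opt_skip_py
  exact root_opt_skip_eq flag
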